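-- pv_equiv track=rewrite | github.com/littlez3/codeguardianIA | codeguardian_ai/src/meta_learning/system.py | _count_nested_patterns
-- ===== SOURCE A (Python) =====
-- from typing import Dict, List, Optional, Any, Tuple, Set, Callable
--
-- def _count_nested_patterns(code: str, patterns: List[str]) -> int:
--     """Count nested patterns in code"""
--     lines = code.split('\n')
--     max_nesting = 0
--     current_nesting = 0
--
--     for line in lines:
--         stripped = line.strip()
--         if any(pattern in stripped for pattern in patterns):
--             current_nesting += 1
--             max_nesting = max(max_nesting, current_nesting)
--         elif stripped.startswith('def ') or stripped.startswith('class '):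
--             current_nesting = 0
--
--     return max_nesting
-- ===== SOURCE B (Python) =====
-- def _count_nested_patterns(code: str, patterns: list) -> int:
--     """Partition the lines at def/class lines that match no pattern, then
--     return the largest number of pattern-matching lines in any segment."""
--     def hit(line):
--         s = line.strip()
--         return any(p in s for p in patterns)
--
--     def cut(line):
--         s = line.strip()
--         return (s.startswith('def ') or s.startswith('class ')) and not hit(line)
--
--     segments = [[]]
--     for line in code.split('\n'):
--         if cut(line):
--             segments.append([])
--         else:
--             segments[-1].append(line)
--     return max(sum(1 for l in seg if hit(l)) for seg in segments)
-- ===== Notes on version B (the rewrite author's own statement) =====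
-- stated objective: alternative
-- what changed: Replaces the running-counter-with-reset state machine by partitioning the lines into segments at non-matching def/class lines and returning the maximum per-segment count of matching lines.
import Mathlib
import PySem

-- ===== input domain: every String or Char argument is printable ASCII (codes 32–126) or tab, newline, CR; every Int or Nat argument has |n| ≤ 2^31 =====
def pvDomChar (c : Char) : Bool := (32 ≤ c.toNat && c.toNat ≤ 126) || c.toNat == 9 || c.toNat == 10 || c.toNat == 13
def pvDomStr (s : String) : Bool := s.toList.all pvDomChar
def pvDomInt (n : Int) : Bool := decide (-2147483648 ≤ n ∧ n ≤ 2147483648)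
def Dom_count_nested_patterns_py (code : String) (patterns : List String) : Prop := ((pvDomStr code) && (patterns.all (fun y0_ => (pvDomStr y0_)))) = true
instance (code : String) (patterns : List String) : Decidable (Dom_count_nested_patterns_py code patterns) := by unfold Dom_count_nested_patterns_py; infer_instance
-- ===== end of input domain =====

-- B partitions the lines into segments at non-matching def/class lines and takes the
-- maximum per-segment count of matching lines, instead of A's running counter with reset.

-- ===== PORT A =====
def pvStepA (patterns : List String) (st : Int × Int) (line : String) : Int × Int :=
  let stripped := PySem.Str.strip line
  if patterns.any (fun p => PySem.Str.isIn p stripped) then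
    (max st.1 (st.2 + 1), st.2 + 1)
  else if PySem.Str.startswith stripped "def " || PySem.Str.startswith stripped "class " then
    (st.1, 0)
  else st

def count_nested_patterns_py (code : String) (patterns : List String) : Int :=
  -- code.split('\n'): the separator is the non-empty literal '\n', so split? is always some
  (((PySem.Str.split? code "\n").getD []).foldl (pvStepA patterns) (0, 0)).1

-- ===== PORT B =====
def pvHit (patterns : List String) (line : String) : Bool :=
  patterns.any (fun p => PySem.Str.isIn p (PySem.Str.strip line))

def pvCut (patterns : List String) (line : String) : Bool :=
  let s := PySem.Str.strip line
  (PySem.Str.startswith s "def " || PySem.Str.startswith s "class ") && !(pvHit patterns line)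

-- Source B's segment-building loop as the obvious structural recursion over the lines
def pvSegs (patterns : List String) : List String → List (List String)
  | [] => [[]]
  | l :: ls =>
    if pvCut patterns l then [] :: pvSegs patterns ls
    else
      match pvSegs patterns ls with
      | s :: rest => (l :: s) :: rest
      | [] => [[l]]   -- unreachable: pvSegs is never empty

-- sum(1 for l in seg if hit(l))
def pvCnt (patterns : List String) (seg : List String) : Int :=
  seg.foldl (fun acc l => if pvHit patterns l then acc + 1 else acc) 0

def count_nested_patterns_py_alt (code : String) (patterns : List String) : Int :=
  let counts := (pvSegs patterns ((PySem.Str.split? code "\n").getD [])).map (pvCnt patterns)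
  -- max over the (always non-empty) list of segment counts
  match counts with
  | [] => 0          -- unreachable
  | c :: cs => cs.foldl max c

-- ===== PRECONDITION & SPEC =====
def Spec_count_nested_patterns_py (code : String) (patterns : List String) (out : Int) : Prop := out = count_nested_patterns_py_alt code patterns
instance (code : String) (patterns : List String) (out : Int) : Decidable (Spec_count_nested_patterns_py code patterns out) := by unfold Spec_count_nested_patterns_py; infer_instance

-- ===== CLAIM (what is proved, stated in full; the proofs are below) =====
def Claim_equal_count_nested_patterns_py : Prop := ∀ (code : String) (patterns : List String), Dom_count_nested_patterns_py code patterns → Spec_count_nested_patterns_py code patterns (count_nested_patterns_py code patterns)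

-- ===== LEMMAS AND PROOFS =====
theorem pvSegs_ne_nil (patterns : List String) (ls : List String) : pvSegs patterns ls ≠ [] := by
  cases ls with
  | nil => simp [pvSegs]
  | cons l ls =>
    simp only [pvSegs]
    split
    · simp
    · cases h : pvSegs patterns ls <;> simp

theorem pvCnt_shift (patterns : List String) (seg : List String) (a : Int) :
    seg.foldl (fun acc l => if pvHit patterns l then acc + 1 else acc) a
      = a + pvCnt patterns seg := by
  induction seg generalizing a with
  | nil => simp [pvCnt]
  | cons l seg ih =>
    simp only [pvCnt, List.foldl] at *
    by_cases h : pvHit patterns l <;> simp only [h, if_true, if_false, Bool.false_eq_true] <;>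
      [rw [ih (a + 1), ih (0 + 1)]; rw [ih a]] <;> omega

theorem pvCnt_cons (patterns : List String) (l : String) (seg : List String) :
    pvCnt patterns (l :: seg) = (if pvHit patterns l then 1 else 0) + pvCnt patterns seg := by
  simp only [pvCnt, List.foldl]
  by_cases h : pvHit patterns l <;>
    simp only [h, ite_true, ite_false, Bool.false_eq_true] <;>
    rw [pvCnt_shift] <;> simp [pvCnt]

theorem pvCnt_nonneg (patterns : List String) (seg : List String) : 0 ≤ pvCnt patterns seg := by
  induction seg with
  | nil => simp [pvCnt]
  | cons l seg ih =>
    rw [pvCnt_cons]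
    split <;> omega

theorem pv_key (patterns : List String) (ls : List String) :
    ∀ (maxn cur : Int) (s0 : List String) (rest : List (List String)),
      pvSegs patterns ls = s0 :: rest → 0 ≤ cur → cur ≤ maxn →
      (ls.foldl (pvStepA patterns) (maxn, cur)).1
        = (rest.map (pvCnt patterns)).foldl max (max maxn (cur + pvCnt patterns s0)) := by
  induction ls with
  | nil =>
    intro maxn cur s0 rest hseg h0 hle
    simp only [pvSegs, List.cons.injEq, List.nil_eq] at hseg
    obtain ⟨h1, h2⟩ := hseg
    subst h1; subst h2
    simp only [List.foldl, List.map, pvCnt]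
    omega
  | cons l ls ih =>
    intro maxn cur s0 rest hseg h0 hle
    cases htail : pvSegs patterns ls with
    | nil => exact absurd htail (pvSegs_ne_nil patterns ls)
    | cons t0 trest =>
      cases hhit : pvHit patterns l with
      | true =>
        -- matching line: counter bumps, line joins the first segment
        have hcut : pvCut patterns l = false := by
          simp only [pvCut, hhit, Bool.not_true, Bool.and_false]
        rw [pvSegs, hcut] at hseg
        simp only [Bool.false_eq_true, if_false, htail, List.cons.injEq] at hseg
        obtain ⟨h1, h2⟩ := hseg
        subst h1; subst h2
        have hstep : pvStepA patterns (maxn, cur) l = (max maxn (cur + 1), cur + 1) := by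
          have : (patterns.any fun p => PySem.Str.isIn p (PySem.Str.strip l)) = true := hhit
          simp only [pvStepA, this, if_true]
        rw [List.foldl_cons, hstep,
          ih (max maxn (cur + 1)) (cur + 1) t0 trest htail (by omega) (by omega)]
        have hc := pvCnt_nonneg patterns t0
        rw [pvCnt_cons, hhit]
        simp only [ite_true]
        congr 1
        omega
      | false =>
        have hhit' : (patterns.any fun p => PySem.Str.isIn p (PySem.Str.strip l)) = false := hhit
        cases hdc : (PySem.Str.startswith (PySem.Str.strip l) "def "
                      || PySem.Str.startswith (PySem.Str.strip l) "class ") with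
        | true =>
          -- non-matching def/class line: counter resets, a new segment starts
          have hcut : pvCut patterns l = true := by
            simp only [pvCut, hhit, hdc, Bool.not_false, Bool.and_true]
          rw [pvSegs, hcut] at hseg
          simp only [if_true, htail, List.cons.injEq] at hseg
          obtain ⟨h1, h2⟩ := hseg
          subst h1; subst h2
          have hstep : pvStepA patterns (maxn, cur) l = (maxn, 0) := by
            simp only [pvStepA, hhit', hdc, Bool.false_eq_true, if_false, if_true]
          rw [List.foldl_cons, hstep, ih maxn 0 t0 trest htail le_rfl (by omega)]
          have hnil : pvCnt patterns ([] : List String) = 0 := rfl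
          rw [List.map_cons, List.foldl_cons, hnil,
            show max (max maxn (cur + 0)) (pvCnt patterns t0)
                = max maxn (0 + pvCnt patterns t0) by omega]
        | false =>
          -- ordinary line: state unchanged, line joins the first segment
          have hcut : pvCut patterns l = false := by
            simp only [pvCut, hdc, Bool.false_and]
          rw [pvSegs, hcut] at hseg
          simp only [Bool.false_eq_true, if_false, htail, List.cons.injEq] at hseg
          obtain ⟨h1, h2⟩ := hseg
          subst h1; subst h2
          have hstep : pvStepA patterns (maxn, cur) l = (maxn, cur) := by
            simp only [pvStepA, hhit', hdc, Bool.false_eq_true, if_false]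
          rw [List.foldl_cons, hstep, ih maxn cur t0 trest htail h0 hle]
          rw [pvCnt_cons, hhit]
          simp only [Bool.false_eq_true, ite_false, zero_add]
  
-- ===== VERDICT (by name: the statement is the Claim_ definition above) =====
theorem count_nested_patterns_py_spec : Claim_equal_count_nested_patterns_py := by
  intro code patterns _
  unfold Spec_count_nested_patterns_py count_nested_patterns_py count_nested_patterns_py_alt
  cases hseg : pvSegs patterns ((PySem.Str.split? code "\n").getD []) with
  | nil => exact absurd hseg (pvSegs_ne_nil _ _)
  | cons s0 rest =>
    rw [pv_key patterns _ 0 0 s0 rest hseg le_rfl le_rfl]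
    simp only [List.map]
    have := pvCnt_nonneg patterns s0
    congr 1
    omega
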